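-- pv_equiv track=rewrite | github.com/rockmrack/CrownSafe | core/crown_score_engine.py | _detect_dangerous_combinations
-- ===== SOURCE A (Python) =====
-- def _detect_dangerous_combinations(ingredients: list[str]) -> int:
--     """Detect dangerous ingredient combinations."""
--     penalty = 0
--     ingredient_names_lower = [i.lower() for i in ingredients]
--
--     # Alcohol + Sulfate combo
--     has_alcohol = any("alcohol" in i and "cetearyl" not in i for i in ingredient_names_lower)
--     has_sulfate = any("sulfate" in i for i in ingredient_names_lower)
--     if has_alcohol and has_sulfate:
--         penalty -= 40  # Compounded drying effect
--
--     # Heavy silicones without clarifying agents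
--     has_silicone = any("dimethicone" in i for i in ingredient_names_lower)
--     has_clarifier = any("sulfate" in i for i in ingredient_names_lower)
--     if has_silicone and not has_clarifier:
--         penalty -= 15
--
--     return penalty
-- ===== SOURCE B (Python) =====
-- # Table-driven: keyword rules set bits in a hazard mask; an 8-entry table maps mask -> penalty.
-- _RULES = [("alcohol", 4, "cetearyl"), ("sulfate", 2, None), ("dimethicone", 1, None)]
-- # index = alcohol*4 + sulfate*2 + silicone*1
-- _PENALTY = [0, -15, 0, 0, 0, -15, -40, -40]
--
-- def _detect_dangerous_combinations(ingredients: list[str]) -> int: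
--     """Detect dangerous ingredient combinations (bitmask + lookup table)."""
--     mask = 0
--     for name in ingredients:
--         n = name.lower()
--         for keyword, bit, exclusion in _RULES:
--             if keyword in n and (exclusion is None or exclusion not in n):
--                 mask |= bit
--     return _PENALTY[mask]
-- ===== Notes on version B (the rewrite author's own statement) =====
-- stated objective: alternative
-- what changed: Replaced four any()-scans and two hardcoded if-penalty rules with a data-driven design: one pass ORs keyword-rule bits into a 3-bit hazard mask, and an 8-entry lookup table maps the mask directly to the penalty (the duplicated sulfate/clarifier scan collapses into one bit).
import Mathlib
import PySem

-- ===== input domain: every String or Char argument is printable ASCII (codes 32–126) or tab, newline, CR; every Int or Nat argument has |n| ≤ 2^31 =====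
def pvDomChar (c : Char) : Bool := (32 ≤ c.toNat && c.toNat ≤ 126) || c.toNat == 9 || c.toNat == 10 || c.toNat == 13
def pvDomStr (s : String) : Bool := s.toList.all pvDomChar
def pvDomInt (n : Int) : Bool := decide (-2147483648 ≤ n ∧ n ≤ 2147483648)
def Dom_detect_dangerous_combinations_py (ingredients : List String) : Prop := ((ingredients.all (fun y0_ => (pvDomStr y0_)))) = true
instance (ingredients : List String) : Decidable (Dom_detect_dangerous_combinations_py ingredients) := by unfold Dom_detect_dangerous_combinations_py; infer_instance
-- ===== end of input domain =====

-- B replaces A's four any()-scans and two if-rules with a data-driven single pass: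
-- keyword rules OR bits into a 3-bit hazard mask, and an 8-entry table maps the mask to the penalty.

-- ===== PORT A =====
def detect_dangerous_combinations_py (ingredients : List String) : Int :=
  let penalty : Int := 0
  let ingredient_names_lower := ingredients.map PySem.Str.lower
  let has_alcohol := ingredient_names_lower.any
    (fun i => PySem.Str.isIn "alcohol" i && !PySem.Str.isIn "cetearyl" i)
  let has_sulfate := ingredient_names_lower.any (fun i => PySem.Str.isIn "sulfate" i)
  let penalty := if has_alcohol && has_sulfate then penalty - 40 else penalty
  let has_silicone := ingredient_names_lower.any (fun i => PySem.Str.isIn "dimethicone" i)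
  let has_clarifier := ingredient_names_lower.any (fun i => PySem.Str.isIn "sulfate" i)
  if has_silicone && !has_clarifier then penalty - 15 else penalty

-- ===== PORT B =====
def pvRules : List (String × Nat × Option String) :=
  [("alcohol", 4, some "cetearyl"), ("sulfate", 2, none), ("dimethicone", 1, none)]

def pvPenaltyTable : List Int := [0, -15, 0, 0, 0, -15, -40, -40]

def detect_dangerous_combinations_py_alt (ingredients : List String) : Int :=
  let mask := ingredients.foldl
    (fun (mask : Nat) name =>
      let n := PySem.Str.lower name
      pvRules.foldl
        (fun m rule =>
          if PySem.Str.isIn rule.1 n &&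
             (match rule.2.2 with
              | none => true
              | some e => !PySem.Str.isIn e n)
          then m ||| rule.2.1 else m)
        mask)
    0
  pvPenaltyTable.getD mask 0

-- ===== PRECONDITION & SPEC =====
def Spec_detect_dangerous_combinations_py (ingredients : List String) (out : Int) : Prop := out = detect_dangerous_combinations_py_alt ingredients
instance (ingredients : List String) (out : Int) : Decidable (Spec_detect_dangerous_combinations_py ingredients out) := by unfold Spec_detect_dangerous_combinations_py; infer_instance

-- ===== CLAIM (what is proved, stated in full; the proofs are below) =====
def Claim_equal_detect_dangerous_combinations_py : Prop := ∀ (ingredients : List String), Dom_detect_dangerous_combinations_py ingredients → Spec_detect_dangerous_combinations_py ingredients (detect_dangerous_combinations_py ingredients)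

-- ===== LEMMAS AND PROOFS =====
-- encode the three hazard flags as B's bitmask
def pvEnc (a s si : Bool) : Nat :=
  (cond a 4 0) ||| (cond s 2 0) ||| (cond si 1 0)

-- one ingredient's inner rule-fold updates the encoded mask flag-wise
theorem pv_enc_step (a s si p q r : Bool) :
    (if r then (if q then (if p then pvEnc a s si ||| 4 else pvEnc a s si) ||| 2
                else (if p then pvEnc a s si ||| 4 else pvEnc a s si)) ||| 1
     else (if q then (if p then pvEnc a s si ||| 4 else pvEnc a s si) ||| 2
           else (if p then pvEnc a s si ||| 4 else pvEnc a s si)))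
    = pvEnc (a || p) (s || q) (si || r) := by
  cases a <;> cases s <;> cases si <;> cases p <;> cases q <;> cases r <;> decide

-- B's outer fold computes the encoding of A's three any-flags
theorem pv_mask_eq (l : List String) (a s si : Bool) :
    l.foldl
      (fun (mask : Nat) name =>
        let n := PySem.Str.lower name
        pvRules.foldl
          (fun m rule =>
            if PySem.Str.isIn rule.1 n &&
               (match rule.2.2 with
                | none => true
                | some e => !PySem.Str.isIn e n)
            then m ||| rule.2.1 else m)
          mask)
      (pvEnc a s si)
    = pvEnc
        (a || (l.map PySem.Str.lower).any
            (fun i => PySem.Str.isIn "alcohol" i && !PySem.Str.isIn "cetearyl" i))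
        (s || (l.map PySem.Str.lower).any (fun i => PySem.Str.isIn "sulfate" i))
        (si || (l.map PySem.Str.lower).any (fun i => PySem.Str.isIn "dimethicone" i)) := by
  induction l generalizing a s si with
  | nil => simp
  | cons x xs ih =>
    rw [List.foldl_cons]
    have h := pv_enc_step a s si
      (PySem.Str.isIn "alcohol" (PySem.Str.lower x) && !PySem.Str.isIn "cetearyl" (PySem.Str.lower x))
      (PySem.Str.isIn "sulfate" (PySem.Str.lower x))
      (PySem.Str.isIn "dimethicone" (PySem.Str.lower x))
    simp only [pvRules, List.foldl_cons, List.foldl_nil, Bool.and_true] at *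
    rw [h, ih]
    simp [Bool.or_assoc]

-- the lookup table agrees with A's two penalty rules on every flag combination
theorem pv_table_eq (a s si : Bool) :
    pvPenaltyTable.getD (pvEnc a s si) 0
      = (if si && !s then (if a && s then (0:Int) - 40 else 0) - 15
         else (if a && s then (0:Int) - 40 else 0)) := by
  cases a <;> cases s <;> cases si <;> decide

-- ===== VERDICT (by name: the statement is the Claim_ definition above) =====
theorem detect_dangerous_combinations_py_spec : Claim_equal_detect_dangerous_combinations_py := by
  intro ingredients _
  unfold Spec_detect_dangerous_combinations_py
  unfold detect_dangerous_combinations_py detect_dangerous_combinations_py_alt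
  have hm := pv_mask_eq ingredients false false false
  simp only [pvEnc, Bool.false_or, cond_false, Nat.zero_or] at hm
  simp only [hm]
  have ht := pv_table_eq
    ((ingredients.map PySem.Str.lower).any
      (fun i => PySem.Str.isIn "alcohol" i && !PySem.Str.isIn "cetearyl" i))
    ((ingredients.map PySem.Str.lower).any (fun i => PySem.Str.isIn "sulfate" i))
    ((ingredients.map PySem.Str.lower).any (fun i => PySem.Str.isIn "dimethicone" i))
  simp only [pvEnc] at ht
  rw [ht]
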